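-- pv_equiv track=rewrite | github.com/rocmewtwo/neetcode | cores/binary_search/bisec_left_right.py | bisec_right
-- ===== SOURCE A (Python) =====
-- def bisec_right(nums, val) -> int:
--     l = 0
--     r = len(nums)
--
--     l = 0
--     r = len(nums)
--     while l < r:
--         m = (l + r) // 2
--         if val >= nums[m]:  # if greater or equal, move left
--             l = m + 1
--         else:
--             r = m
--     return l
-- ===== SOURCE B (Python) =====
-- def bisec_right(nums, val) -> int:
--     # Recursive divide-and-conquer on list slices: split the current
--     # sub-list at its middle, recurse into one half, accumulate the offset.
--     def go(sub):
--         if not sub: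
--             return 0
--         m = len(sub) // 2
--         if val >= sub[m]:
--             return m + 1 + go(sub[m + 1:])
--         return go(sub[:m])
--     return go(nums)
-- ===== Notes on version B (the rewrite author's own statement) =====
-- stated objective: alternative
-- what changed: Replaces the index-pair while loop with a recursive divide-and-conquer over list slices that accumulates the offset additively (no l/r indices maintained).
import Mathlib
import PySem

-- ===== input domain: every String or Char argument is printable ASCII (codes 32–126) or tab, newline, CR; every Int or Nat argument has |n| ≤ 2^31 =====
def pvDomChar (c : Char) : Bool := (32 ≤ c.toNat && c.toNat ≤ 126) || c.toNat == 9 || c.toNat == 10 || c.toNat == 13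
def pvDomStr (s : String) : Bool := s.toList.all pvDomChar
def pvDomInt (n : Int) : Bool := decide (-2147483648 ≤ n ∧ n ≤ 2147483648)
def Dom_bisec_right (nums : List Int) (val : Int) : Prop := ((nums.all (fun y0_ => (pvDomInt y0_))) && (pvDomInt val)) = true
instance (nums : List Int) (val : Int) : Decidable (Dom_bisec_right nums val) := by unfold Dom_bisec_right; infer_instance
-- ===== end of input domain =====

-- B replaces A's index-pair while loop by a recursive divide-and-conquer over
-- list slices accumulating the offset; proved to return A's exact value.


-- ===== PORT A =====
-- while loop over the index pair (l, r); l, r stay in [0, len nums], so Nat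
-- indices and Nat division coincide exactly with Python's ints and `//` here.
def bisecLoopA (nums : List Int) (val : Int) (l r : Nat) : Nat :=
  if h : l < r then
    let m := (l + r) / 2
    if val ≥ nums.getD m 0 then bisecLoopA nums val (m + 1) r
    else bisecLoopA nums val l m
  else l
termination_by r - l
decreasing_by all_goals omega

def bisec_right (nums : List Int) (val : Int) : Int :=
  (bisecLoopA nums val 0 nums.length : Int)

-- ===== PORT B =====
-- recursion on the sub-list; sub[m+1:] and sub[:m] are List.drop / List.take
-- (exact for these nonnegative in-range slice bounds).
def bisecGoB (val : Int) (sub : List Int) : Nat :=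
  if h : sub = [] then 0
  else
    let m := sub.length / 2
    if val ≥ sub.getD m 0 then m + 1 + bisecGoB val (sub.drop (m + 1))
    else bisecGoB val (sub.take m)
termination_by sub.length
decreasing_by
  all_goals
    have := List.length_pos_of_ne_nil h
    simp [List.length_take]
    omega

def bisec_right_alt (nums : List Int) (val : Int) : Int :=
  (bisecGoB val nums : Int)

-- ===== PRECONDITION & SPEC =====
def Spec_bisec_right (nums : List Int) (val : Int) (out : Int) : Prop := out = bisec_right_alt nums val
instance (nums : List Int) (val : Int) (out : Int) : Decidable (Spec_bisec_right nums val out) := by unfold Spec_bisec_right; infer_instance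

-- ===== CLAIM (what is proved, stated in full; the proofs are below) =====
def Claim_equal_bisec_right : Prop := ∀ (nums : List Int) (val : Int), Dom_bisec_right nums val → Spec_bisec_right nums val (bisec_right nums val)

-- ===== LEMMAS AND PROOFS =====
lemma bisec_key (nums : List Int) (val : Int) :
    ∀ n l r, r - l ≤ n → l ≤ r → r ≤ nums.length →
      bisecLoopA nums val l r = l + bisecGoB val ((nums.drop l).take (r - l)) := by
  intro n
  induction n with
  | zero =>
      intro l r h1 h2 h3
      have hlr : l = r := by omega
      subst hlr
      rw [bisecLoopA, bisecGoB]
      simp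
  | succ n ih =>
      intro l r h1 h2 h3
      by_cases hlt : l < r
      · have hsublen : ((nums.drop l).take (r - l)).length = r - l := by
          simp; omega
        have hsubne : (nums.drop l).take (r - l) ≠ [] := by
          intro h; rw [h] at hsublen; simp at hsublen; omega
        have hm : (l + r) / 2 = l + (r - l) / 2 := by omega
        set mr := (r - l) / 2 with hmr
        have hmrlt : mr < r - l := by omega
        have hget : ((nums.drop l).take (r - l)).getD mr 0 = nums.getD (l + mr) 0 := by
          have h1' : mr < ((nums.drop l).take (r - l)).length := by rw [hsublen]; exact hmrlt
          have h2' : l + mr < nums.length := by omega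
          rw [List.getD_eq_getElem _ _ h1', List.getD_eq_getElem _ _ h2']
          simp [List.getElem_take, List.getElem_drop]
        rw [bisecLoopA, bisecGoB, dif_pos hlt, dif_neg hsubne]
        simp only [hsublen, hm, ← hmr, hget]
        by_cases hc : val ≥ nums.getD (l + mr) 0
        · rw [if_pos hc, if_pos hc]
          rw [ih (l + mr + 1) r (by omega) (by omega) h3]
          have heq : ((nums.drop l).take (r - l)).drop (mr + 1)
              = (nums.drop (l + mr + 1)).take (r - (l + mr + 1)) := by
            have e1 : r - l - (mr + 1) = r - (l + mr + 1) := by omega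
            have e2 : l + (mr + 1) = l + mr + 1 := by omega
            rw [List.drop_take, List.drop_drop, e1, e2]
          rw [heq]
          omega
        · rw [if_neg hc, if_neg hc]
          rw [ih l (l + mr) (by omega) (by omega) (by omega)]
          have heq : ((nums.drop l).take (r - l)).take mr
              = (nums.drop l).take (l + mr - l) := by
            rw [List.take_take]
            congr 1; omega
          rw [heq]
      · have hlr : l = r := by omega
        subst hlr
        rw [bisecLoopA, bisecGoB]
        simp

-- ===== VERDICT (by name: the statement is the Claim_ definition above) =====
theorem bisec_right_spec : Claim_equal_bisec_right := by
  intro nums val _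
  unfold Spec_bisec_right bisec_right bisec_right_alt
  rw [bisec_key nums val nums.length 0 nums.length (by omega) (by omega) (le_refl _)]
  simp
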